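-- pv_equiv track=rewrite | github.com/giopera/lampioni-stats | scripts/stats.py | generate_user_daily
-- ===== SOURCE A (Python) =====
-- def generate_user_daily(base_data):
--     base_data = base_data["elements"]
--     days={}
--     for element in base_data:
--         date = element["timestamp"].split('T', 1)[0]
--         if not days.get(date):
--             days[date] = {}
--         if not days.get(date).get(element["user"]):
--             days[date][element["user"]] = 0
--         days[date][element["user"]] = days[date][element["user"]] + 1
--     return days
-- ===== SOURCE B (Python) =====
-- def generate_user_daily(base_data):
--     # Phase 1: flat count table keyed by (date, user) pairs.
--     counts = {}
--     for element in base_data["elements"]: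
--         key = (element["timestamp"].split('T', 1)[0], element["user"])
--         counts[key] = counts.get(key, 0) + 1
--     # Phase 2: pivot the flat table into the nested per-day result.
--     days = {}
--     for (date, user), c in counts.items():
--         days.setdefault(date, {})[user] = c
--     return days
-- ===== Notes on version B (the rewrite author's own statement) =====
-- stated objective: idiomatic
-- what changed: B first builds a flat count table keyed by (date, user) pairs in one counting pass, then a second pass pivots that flat table into the nested per-day dict, instead of A's single pass that creates and updates the nested dict in place with falsiness-based existence checks.
import Mathlib
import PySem

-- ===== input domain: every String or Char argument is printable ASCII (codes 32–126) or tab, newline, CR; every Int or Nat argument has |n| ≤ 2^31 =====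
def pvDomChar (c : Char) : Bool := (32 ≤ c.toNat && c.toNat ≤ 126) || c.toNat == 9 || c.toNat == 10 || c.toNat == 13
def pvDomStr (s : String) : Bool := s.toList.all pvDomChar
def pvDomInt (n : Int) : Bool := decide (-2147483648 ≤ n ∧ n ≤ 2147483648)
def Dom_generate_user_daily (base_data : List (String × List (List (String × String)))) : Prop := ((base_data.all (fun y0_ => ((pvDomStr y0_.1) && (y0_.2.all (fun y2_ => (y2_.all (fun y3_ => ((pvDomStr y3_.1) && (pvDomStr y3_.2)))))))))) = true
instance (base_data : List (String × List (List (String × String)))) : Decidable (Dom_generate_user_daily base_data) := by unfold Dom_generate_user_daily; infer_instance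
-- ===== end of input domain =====

-- B rewrites A's single nested-dict-in-place pass as two passes: a flat (date,user) count table, then a pivot into the nested result (idiomatic two-phase shape; same cost).

-- ===== PORT A =====
-- date = element["timestamp"].split('T', 1)[0]  (the split always yields a nonempty list, so [0] is its head)
def guKey (element : List (String × String)) : String × String :=
  (((PySem.Str.splitMax? ((PySem.Dict.ofList element).getD "timestamp" "") "T" 1).getD []).headD "",
   (PySem.Dict.ofList element).getD "user" "")

-- A's loop body on the pair (date, user); missing keys are excluded by Pre_ (Python raises KeyError there)
def guStepA (days : PySem.Dict String (PySem.Dict String Int)) (k : String × String) :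
    PySem.Dict String (PySem.Dict String Int) :=
  let days := if ((days.get? k.1).getD PySem.Dict.empty).items.isEmpty
              then days.insert k.1 PySem.Dict.empty else days   -- if not days.get(date): days[date] = {}
  let inner := (days.get? k.1).getD PySem.Dict.empty
  let inner := if ((inner.get? k.2).getD 0) == 0
               then inner.insert k.2 0 else inner                -- if not days.get(date).get(user): ... = 0
  days.insert k.1 (inner.insert k.2 (((inner.get? k.2).getD 0) + 1))

def generate_user_daily (base_data : List (String × List (List (String × String)))) :
    List (String × List (String × Int)) :=
  let elements := (PySem.Dict.ofList base_data).getD "elements" []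
  ((elements.foldl (fun days element => guStepA days (guKey element)) PySem.Dict.empty).items.map
    (fun p => (p.1, p.2.items)))

-- ===== PORT B =====
-- phase 1 body: counts[key] = counts.get(key, 0) + 1
def guStepCount (counts : PySem.Dict (String × String) Int) (k : String × String) :
    PySem.Dict (String × String) Int :=
  counts.insert k (counts.getD k 0 + 1)

-- phase 2 body: days.setdefault(date, {})[user] = c
def guStepPivot (days : PySem.Dict String (PySem.Dict String Int)) (p : (String × String) × Int) :
    PySem.Dict String (PySem.Dict String Int) :=
  let days := days.setdefault p.1.1 PySem.Dict.empty
  days.insert p.1.1 ((days.getD p.1.1 PySem.Dict.empty).insert p.1.2 p.2)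

def generate_user_daily_alt (base_data : List (String × List (List (String × String)))) :
    List (String × List (String × Int)) :=
  let elements := (PySem.Dict.ofList base_data).getD "elements" []
  let counts := elements.foldl (fun counts element => guStepCount counts (guKey element)) PySem.Dict.empty
  ((counts.items.foldl guStepPivot PySem.Dict.empty).items.map (fun p => (p.1, p.2.items)))

-- ===== PRECONDITION & SPEC =====
-- Pre_ excludes exactly the inputs where Python A raises KeyError: a missing "elements" key, or an element without "timestamp" or "user".
def Pre_generate_user_daily (base_data : List (String × List (List (String × String)))) : Prop :=
  (PySem.Dict.ofList base_data).contains "elements" = true ∧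
  ∀ element ∈ (PySem.Dict.ofList base_data).getD "elements" [],
    (PySem.Dict.ofList element).contains "timestamp" = true ∧
    (PySem.Dict.ofList element).contains "user" = true
instance (base_data : List (String × List (List (String × String)))) : Decidable (Pre_generate_user_daily base_data) := by unfold Pre_generate_user_daily; infer_instance

def pvWitness_generate_user_daily : (List (String × List (List (String × String)))) :=
  [("elements", [[("timestamp", "2024-01-01T10:00"), ("user", "alice")],
                 [("timestamp", "2024-01-01T11:00"), ("user", "alice")],
                 [("timestamp", "2024-01-02T09:00"), ("user", "bob")]])]

def Spec_generate_user_daily (base_data : List (String × List (List (String × String)))) (out : List (String × List (String × Int))) : Prop := out = generate_user_daily_alt base_data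
instance (base_data : List (String × List (List (String × String)))) (out : List (String × List (String × Int))) : Decidable (Spec_generate_user_daily base_data out) := by unfold Spec_generate_user_daily; infer_instance

-- ===== CLAIM (what is proved, stated in full; the proofs are below) =====
def Claim_equal_generate_user_daily : Prop := ∀ (base_data : List (String × List (List (String × String)))), Dom_generate_user_daily base_data → Pre_generate_user_daily base_data → Spec_generate_user_daily base_data (generate_user_daily base_data)

-- ===== LEMMAS AND PROOFS =====

-- the common normal form: dates in first-occurrence order, users per date in first-occurrence order, with counts
def guNest (ks : List (String × String)) : PySem.Dict String (PySem.Dict String Int) :=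
  PySem.Dict.mk ((PySem.Set.ofList (ks.map Prod.fst)).map (fun d =>
    (d, PySem.Dict.mk ((PySem.Set.ofList ((ks.filter (fun k => k.1 == d)).map Prod.snd)).map
          (fun u => (u, (ks.count (d, u) : Int)))))))

theorem mkMap_get? {κ ν : Type} [BEq κ] [LawfulBEq κ] [DecidableEq κ] (D : List κ) (f : κ → ν) (x : κ) :
    (PySem.Dict.mk (D.map fun d => (d, f d))).get? x = if x ∈ D then some (f x) else none := by
  induction D with
  | nil => simp [PySem.Dict.get?]
  | cons a D ih =>
    rw [List.map_cons, PySem.Dict.get?_mk_cons, ih]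
    by_cases h : a = x
    · subst h; simp
    · simp [h, Ne.symm h]

theorem mkMap_contains {κ ν : Type} [BEq κ] [LawfulBEq κ] [DecidableEq κ] (D : List κ) (f : κ → ν) (x : κ) :
    (PySem.Dict.mk (D.map fun d => (d, f d))).contains x = decide (x ∈ D) := by
  rw [PySem.Dict.contains_eq_isSome_get?, mkMap_get?]
  by_cases h : x ∈ D <;> simp [h]



theorem ofList_map_ofList {α β : Type} [BEq α] [LawfulBEq α] [BEq β] [LawfulBEq β] (f : α → β) (l : List α) :
    PySem.Set.ofList ((PySem.Set.ofList l).map f) = PySem.Set.ofList (l.map f) := by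
  induction l using List.reverseRecOn with
  | nil => rfl
  | append_singleton l x ih =>
    rw [PySem.Set.ofList_append_singleton, List.map_append, List.map_singleton,
        PySem.Set.ofList_append_singleton]
    by_cases h : x ∈ PySem.Set.ofList l
    · rw [PySem.Set.add_of_mem h, ih, PySem.Set.add_of_mem]
      exact (PySem.Set.mem_ofList _ _).2 (List.mem_map_of_mem ((PySem.Set.mem_ofList _ _).1 h))
    · rw [PySem.Set.add_of_not_mem h, List.map_append, List.map_singleton,
        PySem.Set.ofList_append_singleton, ih]

theorem ofList_filter {α : Type} [BEq α] [LawfulBEq α] (p : α → Bool) (l : List α) :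
    (PySem.Set.ofList l).filter p = PySem.Set.ofList (l.filter p) := by
  induction l using List.reverseRecOn with
  | nil => rfl
  | append_singleton l x ih =>
    rw [PySem.Set.ofList_append_singleton, List.filter_append]
    by_cases h : x ∈ PySem.Set.ofList l
    · rw [PySem.Set.add_of_mem h, ih]
      by_cases hp : p x = true
      · have hx : x ∈ PySem.Set.ofList (l.filter p) :=
          (PySem.Set.mem_ofList _ _).2 (List.mem_filter.2 ⟨(PySem.Set.mem_ofList _ _).1 h, hp⟩)
        simp only [List.filter_cons, hp, if_pos, List.filter_nil,
          PySem.Set.ofList_append_singleton, PySem.Set.add_of_mem hx]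
      · simp [hp]
    · rw [PySem.Set.add_of_not_mem h, List.filter_append, ih]
      by_cases hp : p x = true
      · have hx : x ∉ PySem.Set.ofList (l.filter p) := by
          intro hm
          exact h ((PySem.Set.mem_ofList _ _).2 (List.mem_filter.1 ((PySem.Set.mem_ofList _ _).1 hm)).1)
        simp only [List.filter_cons, hp, if_pos, List.filter_nil,
          PySem.Set.ofList_append_singleton, PySem.Set.add_of_not_mem hx]
      · simp [hp]

theorem ofList_map_snd_const_fst {α β : Type} [BEq α] [LawfulBEq α] [BEq β] [LawfulBEq β]
    [DecidableEq α] [DecidableEq β]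
    (d : α) (t : List (α × β)) (h : ∀ q ∈ t, q.1 = d) :
    PySem.Set.ofList (t.map Prod.snd) = (PySem.Set.ofList t).map Prod.snd := by
  induction t using List.reverseRecOn with
  | nil => rfl
  | append_singleton t x ih =>
    have ht : ∀ q ∈ t, q.1 = d := fun q hq => h q (List.mem_append_left _ hq)
    have hx : x.1 = d := h x (List.mem_append_right _ (List.mem_singleton_self x))
    rw [List.map_append, List.map_singleton, PySem.Set.ofList_append_singleton,
        PySem.Set.ofList_append_singleton, ih ht]
    by_cases hm : x ∈ PySem.Set.ofList t
    · rw [PySem.Set.add_of_mem hm, PySem.Set.add_of_mem]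
      exact List.mem_map_of_mem (f := Prod.snd) hm
    · rw [PySem.Set.add_of_not_mem hm, List.map_append, List.map_singleton,
        PySem.Set.add_of_not_mem]
      intro hmem
      obtain ⟨q, hq, hq2⟩ := List.mem_map.1 hmem
      have hqt : q ∈ t := (PySem.Set.mem_ofList _ _).1 hq
      have : q = x := by
        have h1 : q.1 = x.1 := by rw [ht q hqt, hx]
        exact Prod.ext h1 hq2
      exact hm ((PySem.Set.mem_ofList _ _).2 (this ▸ hqt))

-- date d ≠ x.1: appending x changes neither that day's users nor its counts
theorem guInner_append_ne (s : List (String × String)) (x : String × String) (d : String)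
    (hdx : d ≠ x.1) :
    (PySem.Set.ofList ((((s ++ [x]).filter (fun k => k.1 == d)).map Prod.snd))).map
        (fun u => (u, ((s ++ [x]).count (d, u) : Int)))
    = (PySem.Set.ofList (((s.filter (fun k => k.1 == d)).map Prod.snd))).map
        (fun u => (u, (s.count (d, u) : Int))) := by
  have hf : [x].filter (fun k => k.1 == d) = [] := by
    simp [show (x.1 == d) = false from by simp [Ne.symm hdx]]
  rw [List.filter_append, hf, List.append_nil]
  refine List.map_congr_left (fun u hu => ?_)
  have hcnt : (d, u) ∉ [x] := by
    intro hm
    rw [List.mem_singleton] at hm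
    exact hdx (by rw [← hm])
  rw [List.count_append, List.count_eq_zero.2 hcnt]
  simp

theorem guStepA_of_none (days : PySem.Dict String (PySem.Dict String Int)) (k : String × String)
    (h : days.get? k.1 = none) :
    guStepA days k = days.insert k.1 (PySem.Dict.empty.insert k.2 1) := by
  rw [guStepA]
  simp only [h, Option.getD_none]
  rw [if_pos
    (by decide : (PySem.Dict.empty : PySem.Dict String Int).items.isEmpty = true)]
  rw [PySem.Dict.get?_insert_self, Option.getD_some]
  rw [PySem.Dict.get?_empty, Option.getD_none]
  rw [if_pos (by decide : ((0 : Int) == 0) = true)]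
  rw [PySem.Dict.get?_insert_self, Option.getD_some]
  rw [PySem.Dict.insert_insert_self, PySem.Dict.insert_insert_self]
  norm_num

theorem guA_nest (ks : List (String × String)) :
    ks.foldl guStepA PySem.Dict.empty = guNest ks := by
  induction ks using List.reverseRecOn with
  | nil => rfl
  | append_singleton s x ih =>
    rw [List.foldl_append, List.foldl_cons, List.foldl_nil, ih]
    set U : String → PySem.Set String :=
      fun d => PySem.Set.ofList ((s.filter (fun k => k.1 == d)).map Prod.snd) with hU
    set g : String → PySem.Dict String Int :=
      fun d => PySem.Dict.mk ((U d).map (fun u => (u, (s.count (d, u) : Int)))) with hg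
    set D := PySem.Set.ofList (s.map Prod.fst) with hD
    have hguN : guNest s = PySem.Dict.mk (D.map fun d => (d, g d)) := rfl
    rw [hguN]
    by_cases hx1 : x.1 ∈ D
    · -- the date is already present, with a nonempty user dict
      have hget : (PySem.Dict.mk (D.map fun d => (d, g d))).get? x.1 = some (g x.1) := by
        rw [mkMap_get?, if_pos hx1]
      obtain ⟨k0, hk0s, hk01⟩ : ∃ k0 ∈ s, k0.1 = x.1 := by
        obtain ⟨k0, hk0, h1⟩ := List.mem_map.1 ((PySem.Set.mem_ofList _ _).1 hx1)
        exact ⟨k0, hk0, h1⟩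
      have hUne : U x.1 ≠ [] := by
        intro he
        have : k0.2 ∈ U x.1 := (PySem.Set.mem_ofList _ _).2
          (List.mem_map_of_mem (List.mem_filter.2 ⟨hk0s, by simp [hk01]⟩))
        rw [he] at this; exact absurd this (List.not_mem_nil)
      have hne : ((g x.1).items).isEmpty = false := by
        rw [List.isEmpty_eq_false_iff]
        show (U x.1).map _ ≠ []
        simpa using hUne
      have hstep1 : guStepA (PySem.Dict.mk (D.map fun d => (d, g d))) x
          = (PySem.Dict.mk (D.map fun d => (d, g d))).insert x.1
              ((if (((g x.1).get? x.2).getD 0) == 0 then (g x.1).insert x.2 0 else g x.1).insert x.2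
                (((if (((g x.1).get? x.2).getD 0) == 0 then (g x.1).insert x.2 0 else g x.1).get?
                    x.2).getD 0 + 1)) := by
        rw [guStepA]
        simp only [hget, Option.getD_some, hne, Bool.false_eq_true, if_false]
      rw [hstep1]
      by_cases hu : x.2 ∈ U x.1
      · -- the user is already present for that date with a positive count
        have hmem : (x.1, x.2) ∈ s := by
          obtain ⟨k, hk, hk2⟩ := List.mem_map.1 ((PySem.Set.mem_ofList _ _).1 hu)
          have hk' := List.mem_filter.1 hk
          have hk1 : k.1 = x.1 := by simpa using hk'.2
          have : k = (x.1, x.2) := Prod.ext hk1 hk2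
          exact this ▸ hk'.1
        have hgetu : (g x.1).get? x.2 = some ((s.count (x.1, x.2) : Int)) := by
          show (PySem.Dict.mk ((U x.1).map fun u => (u, (s.count (x.1, u) : Int)))).get? x.2 = _
          rw [mkMap_get?, if_pos hu]
        have hc0 : ((s.count (x.1, x.2) : Int) == 0) = false := by
          rw [beq_eq_false_iff_ne]
          have : s.count (x.1, x.2) ≠ 0 := fun h => (List.count_eq_zero.1 h) hmem
          exact_mod_cast this
        simp only [hgetu, Option.getD_some, hc0, Bool.false_eq_true, if_false]
        -- LHS is now acc.insert x.1 ((g x.1).insert x.2 (count + 1))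
        apply PySem.Dict.ext
        have hcont : (PySem.Dict.mk (D.map fun d => (d, g d))).contains x.1 = true := by
          rw [mkMap_contains]; exact decide_eq_true hx1
        rw [PySem.Dict.items_insert_of_contains _ _ hcont]
        show _ = (PySem.Dict.mk ((PySem.Set.ofList ((s ++ [x]).map Prod.fst)).map (fun d =>
          (d, PySem.Dict.mk ((PySem.Set.ofList (((s ++ [x]).filter (fun k => k.1 == d)).map
            Prod.snd)).map (fun u => (u, ((s ++ [x]).count (d, u) : Int)))))))).items
        rw [List.map_append, List.map_singleton, PySem.Set.ofList_append_singleton, ← hD,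
            PySem.Set.add_of_mem hx1]
        show (D.map fun d => (d, g d)).map _ = D.map _
        rw [List.map_map]
        refine List.map_congr_left (fun d hd => ?_)
        simp only [Function.comp]
        by_cases hdx : d = x.1
        · subst hdx
          rw [if_pos (by simp)]
          refine congrArg (Prod.mk x.1) ?_
          apply PySem.Dict.ext
          have hcontu : (g x.1).contains x.2 = true := by
            show (PySem.Dict.mk ((U x.1).map fun u => (u, (s.count (x.1, u) : Int)))).contains x.2 = _
            rw [mkMap_contains]; exact decide_eq_true hu
          rw [PySem.Dict.items_insert_of_contains _ _ hcontu]
          show ((U x.1).map fun u => (u, (s.count (x.1, u) : Int))).map _ = _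
          have hfx : [x].filter (fun k => k.1 == x.1) = [x] := by simp
          rw [List.filter_append, hfx, List.map_append, List.map_singleton,
              PySem.Set.ofList_append_singleton,
              show PySem.Set.ofList (List.map Prod.snd (List.filter (fun k => k.1 == x.1) s))
                = U x.1 from rfl,
              PySem.Set.add_of_mem hu, List.map_map]
          refine List.map_congr_left (fun u hu' => ?_)
          simp only [Function.comp]
          by_cases hux : u = x.2
          · subst hux
            rw [if_pos (by simp)]
            have hcnt : (s ++ [x]).count (x.1, x.2) = s.count (x.1, x.2) + 1 := by
              rw [List.count_append, List.count_singleton, if_pos (by simp)]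
            rw [hcnt]
            push_cast
            rfl
          · rw [if_neg (by simp [hux])]
            have hcnt : (s ++ [x]).count (x.1, u) = s.count (x.1, u) := by
              rw [List.count_append, List.count_singleton, if_neg (by simp only [beq_iff_eq, Prod.ext_iff, not_and]; intro _ h2; exact hux h2.symm),
                  Nat.add_zero]
            rw [hcnt]
        · rw [if_neg (by simp [hdx])]
          show (d, g d) = (d, PySem.Dict.mk ((PySem.Set.ofList (((s ++ [x]).filter
            (fun k => k.1 == d)).map Prod.snd)).map (fun u => (u, ((s ++ [x]).count (d, u) : Int)))))
          exact congrArg (Prod.mk d) (congrArg PySem.Dict.mk (guInner_append_ne s x d hdx).symm)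
      · -- new user for an existing date
        have hgetu : (g x.1).get? x.2 = none := by
          show (PySem.Dict.mk ((U x.1).map fun u => (u, (s.count (x.1, u) : Int)))).get? x.2 = _
          rw [mkMap_get?, if_neg hu]
        simp only [hgetu, Option.getD_none, beq_self_eq_true, if_pos, PySem.Dict.get?_insert_self,
          Option.getD_some, PySem.Dict.insert_insert_self]
        have hcnt0 : s.count (x.1, x.2) = 0 := by
          rw [List.count_eq_zero]
          intro hmem
          exact hu ((PySem.Set.mem_ofList _ _).2
            (List.mem_map_of_mem (List.mem_filter.2 ⟨hmem, by simp⟩)))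
        apply PySem.Dict.ext
        have hcont : (PySem.Dict.mk (D.map fun d => (d, g d))).contains x.1 = true := by
          rw [mkMap_contains]; exact decide_eq_true hx1
        rw [PySem.Dict.items_insert_of_contains _ _ hcont]
        show _ = (PySem.Dict.mk ((PySem.Set.ofList ((s ++ [x]).map Prod.fst)).map (fun d =>
          (d, PySem.Dict.mk ((PySem.Set.ofList (((s ++ [x]).filter (fun k => k.1 == d)).map
            Prod.snd)).map (fun u => (u, ((s ++ [x]).count (d, u) : Int)))))))).items
        rw [List.map_append, List.map_singleton, PySem.Set.ofList_append_singleton, ← hD,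
            PySem.Set.add_of_mem hx1]
        show (D.map fun d => (d, g d)).map _ = D.map _
        rw [List.map_map]
        refine List.map_congr_left (fun d hd => ?_)
        simp only [Function.comp]
        by_cases hdx : d = x.1
        · subst hdx
          rw [if_pos (by simp)]
          refine congrArg (Prod.mk x.1) ?_
          apply PySem.Dict.ext
          have hcontu : (g x.1).contains x.2 = false := by
            show (PySem.Dict.mk ((U x.1).map fun u => (u, (s.count (x.1, u) : Int)))).contains x.2 = _
            rw [mkMap_contains]; exact decide_eq_false hu
          rw [PySem.Dict.items_insert_of_not_contains _ _ hcontu]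
          show ((U x.1).map fun u => (u, (s.count (x.1, u) : Int))) ++ [(x.2, 0 + 1)] = _
          have hfx : [x].filter (fun k => k.1 == x.1) = [x] := by simp
          rw [List.filter_append, hfx, List.map_append, List.map_singleton,
              PySem.Set.ofList_append_singleton,
              show PySem.Set.ofList (List.map Prod.snd (List.filter (fun k => k.1 == x.1) s))
                = U x.1 from rfl,
              PySem.Set.add_of_not_mem hu, List.map_append, List.map_singleton]
          congr 1
          · refine List.map_congr_left (fun u hu' => ?_)
            have hux : u ≠ x.2 := fun h => hu (h ▸ hu')
            have hcnt : (s ++ [x]).count (x.1, u) = s.count (x.1, u) := by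
              rw [List.count_append, List.count_singleton, if_neg (by simp only [beq_iff_eq, Prod.ext_iff, not_and]; intro _ h2; exact hux h2.symm),
                  Nat.add_zero]
            rw [hcnt]
          · have hcnt : (s ++ [x]).count (x.1, x.2) = 1 := by
              rw [List.count_append, List.count_singleton, if_pos (by simp), hcnt0]
            rw [hcnt]
            rfl
        · rw [if_neg (by simp [hdx])]
          show (d, g d) = (d, PySem.Dict.mk ((PySem.Set.ofList (((s ++ [x]).filter
            (fun k => k.1 == d)).map Prod.snd)).map (fun u => (u, ((s ++ [x]).count (d, u) : Int)))))
          exact congrArg (Prod.mk d) (congrArg PySem.Dict.mk (guInner_append_ne s x d hdx).symm)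
    · -- new date
      have hget : (PySem.Dict.mk (D.map fun d => (d, g d))).get? x.1 = none := by
        rw [mkMap_get?, if_neg hx1]
      have hcont : (PySem.Dict.mk (D.map fun d => (d, g d))).contains x.1 = false := by
        rw [mkMap_contains]; exact decide_eq_false hx1
      have hx1s : x.1 ∉ s.map Prod.fst := fun h => hx1 ((PySem.Set.mem_ofList _ _).2 h)
      have hstep1 : guStepA (PySem.Dict.mk (D.map fun d => (d, g d))) x
          = (PySem.Dict.mk (D.map fun d => (d, g d))).insert x.1 (PySem.Dict.empty.insert x.2 1) := by
        exact guStepA_of_none _ x hget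
      rw [hstep1]
      apply PySem.Dict.ext
      rw [PySem.Dict.items_insert_of_not_contains _ _ hcont]
      show _ = (PySem.Dict.mk ((PySem.Set.ofList ((s ++ [x]).map Prod.fst)).map (fun d =>
        (d, PySem.Dict.mk ((PySem.Set.ofList (((s ++ [x]).filter (fun k => k.1 == d)).map
          Prod.snd)).map (fun u => (u, ((s ++ [x]).count (d, u) : Int)))))))).items
      rw [List.map_append, List.map_singleton, PySem.Set.ofList_append_singleton, ← hD,
          PySem.Set.add_of_not_mem hx1, List.map_append, List.map_singleton]
      congr 1
      · refine List.map_congr_left (fun d hd => ?_)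
        have hdx : d ≠ x.1 := fun h => hx1 (h ▸ hd)
        show (d, g d) = (d, PySem.Dict.mk ((PySem.Set.ofList (((s ++ [x]).filter
          (fun k => k.1 == d)).map Prod.snd)).map (fun u => (u, ((s ++ [x]).count (d, u) : Int)))))
        exact congrArg (Prod.mk d) (congrArg PySem.Dict.mk (guInner_append_ne s x d hdx).symm)
      · have hfilt : s.filter (fun k => k.1 == x.1) = [] := by
          rw [List.filter_eq_nil_iff]
          intro k hk hbeq
          exact hx1s (by
            have : k.1 = x.1 := by simpa using hbeq
            exact this ▸ List.mem_map_of_mem (f := Prod.fst) hk)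
        have hfx : [x].filter (fun k => k.1 == x.1) = [x] := by simp
        have hcnt : (s ++ [x]).count (x.1, x.2) = 1 := by
          rw [List.count_append, List.count_singleton, if_pos (by simp)]
          have : s.count (x.1, x.2) = 0 := by
            rw [List.count_eq_zero]
            intro hmem
            exact hx1s (List.mem_map_of_mem (f := Prod.fst) hmem)
          rw [this]
        rw [List.filter_append, hfilt, List.nil_append, hfx, List.map_singleton]
        show [(x.1, PySem.Dict.empty.insert x.2 1)] = _
        simp only [show (PySem.Set.ofList [x.2] : List String) = [x.2] from rfl,
          List.map_singleton, hcnt]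
        rfl

theorem pivot_map (c : String × String → Int) (s : List (String × String)) (hs : s.Nodup) :
    (s.map (fun k => (k, c k))).foldl guStepPivot PySem.Dict.empty =
    PySem.Dict.mk ((PySem.Set.ofList (s.map Prod.fst)).map (fun d =>
      (d, PySem.Dict.mk ((s.filter (fun k => k.1 == d)).map (fun k => (k.2, c k)))))) := by
  induction s using List.reverseRecOn with
  | nil => rfl
  | append_singleton s x ih =>
    have hnod : s.Nodup := (List.nodup_append.1 hs).1
    have hxs : x ∉ s := fun hx =>
      (List.nodup_append.1 hs).2.2 x hx x (List.mem_singleton_self x) rfl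
    rw [List.map_append, List.map_singleton, List.foldl_append, List.foldl_cons, List.foldl_nil,
        ih hnod]
    set D := PySem.Set.ofList (s.map Prod.fst) with hD
    set g : String → PySem.Dict String Int :=
      fun d => PySem.Dict.mk ((s.filter (fun k => k.1 == d)).map (fun k => (k.2, c k))) with hg
    show guStepPivot (PySem.Dict.mk (D.map fun d => (d, g d))) (x, c x) = _
    by_cases hx1 : x.1 ∈ D
    · have hcont : (PySem.Dict.mk (D.map fun d => (d, g d))).contains x.1 = true := by
        rw [mkMap_contains]; exact decide_eq_true hx1
      have hget : (PySem.Dict.mk (D.map fun d => (d, g d))).getD x.1 PySem.Dict.empty = g x.1 := by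
        rw [PySem.Dict.getD_eq_get?_getD, mkMap_get?, if_pos hx1]; rfl
      have hinner : (g x.1).contains x.2 = false := by
        show (PySem.Dict.mk ((s.filter (fun k => k.1 == x.1)).map (fun k => (k.2, c k)))).contains
          x.2 = false
        have : (s.filter (fun k => k.1 == x.1)).map (fun k => (k.2, c k))
             = ((s.filter (fun k => k.1 == x.1)).map Prod.snd).map (fun u => (u, c (x.1, u))) := by
          rw [List.map_map]
          refine List.map_congr_left (fun k hk => ?_)
          have hk1 : k.1 = x.1 := by simpa using (List.mem_filter.1 hk).2
          simp [Function.comp, ← hk1]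
        rw [this, mkMap_contains, decide_eq_false]
        intro hm
        obtain ⟨k, hk, hk2⟩ := List.mem_map.1 hm
        have hk' := List.mem_filter.1 hk
        exact hxs (by
          have : k = x := Prod.ext (by simpa using hk'.2) hk2
          exact this ▸ hk'.1)
      simp only [guStepPivot, PySem.Dict.setdefault_of_contains _ _ hcont, hget]
      apply PySem.Dict.ext
      rw [PySem.Dict.items_insert_of_contains _ _ hcont]
      show (List.map (fun d => (d, g d)) D).map _
         = (PySem.Set.ofList ((s ++ [x]).map Prod.fst)).map _
      rw [List.map_append, List.map_singleton, PySem.Set.ofList_append_singleton, ← hD,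
          PySem.Set.add_of_mem hx1, List.map_map]
      refine List.map_congr_left (fun d hd => ?_)
      simp only [Function.comp]
      by_cases hdx : d = x.1
      · subst hdx
        rw [if_pos (by simp)]
        refine congrArg (Prod.mk x.1) ?_
        apply PySem.Dict.ext
        rw [PySem.Dict.items_insert_of_not_contains _ _ hinner]
        show List.map (fun k => (k.2, c k)) (List.filter (fun k => k.1 == x.1) s) ++ [(x.2, c x)]
           = List.map (fun k => (k.2, c k)) (List.filter (fun k => k.1 == x.1) (s ++ [x]))
        rw [List.filter_append]
        have h1 : [x].filter (fun k => k.1 == x.1) = [x] := by simp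
        rw [h1, List.map_append, List.map_singleton]
      · rw [if_neg (by simp [hdx])]
        have h2 : (s ++ [x]).filter (fun k => k.1 == d) = s.filter (fun k => k.1 == d) := by
          rw [List.filter_append]
          have : [x].filter (fun k => k.1 == d) = [] := by
            simp [show (x.1 == d) = false from by simp [Ne.symm hdx]]
          rw [this, List.append_nil]
        rw [h2]
    · have hcont : (PySem.Dict.mk (D.map fun d => (d, g d))).contains x.1 = false := by
        rw [mkMap_contains]; exact decide_eq_false hx1
      have hx1s : x.1 ∉ s.map Prod.fst := fun h => hx1 ((PySem.Set.mem_ofList _ _).2 h)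
      have hfilt : s.filter (fun k => k.1 == x.1) = [] := by
        rw [List.filter_eq_nil_iff]
        intro k hk hbeq
        exact hx1s (by
          have : k.1 = x.1 := by simpa using hbeq
          exact this ▸ List.mem_map_of_mem (f := Prod.fst) hk)
      simp only [guStepPivot, PySem.Dict.setdefault_of_not_contains _ _ hcont]
      have hget2 : ((PySem.Dict.mk (D.map fun d => (d, g d))).insert x.1 PySem.Dict.empty).getD
          x.1 PySem.Dict.empty = PySem.Dict.empty := by
        rw [PySem.Dict.getD_eq_get?_getD, PySem.Dict.get?_insert_self]; rfl
      rw [hget2, PySem.Dict.insert_insert_self]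
      apply PySem.Dict.ext
      rw [PySem.Dict.items_insert_of_not_contains _ _ hcont]
      show List.map (fun d => (d, g d)) D ++ [(x.1, PySem.Dict.empty.insert x.2 (c x))]
         = (PySem.Set.ofList ((s ++ [x]).map Prod.fst)).map _
      rw [List.map_append, List.map_singleton, PySem.Set.ofList_append_singleton, ← hD,
          PySem.Set.add_of_not_mem hx1, List.map_append, List.map_singleton]
      congr 1
      · refine List.map_congr_left (fun d hd => ?_)
        have hdx : d ≠ x.1 := fun h => hx1 (h ▸ hd)
        have h2 : (s ++ [x]).filter (fun k => k.1 == d) = s.filter (fun k => k.1 == d) := by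
          rw [List.filter_append]
          have : [x].filter (fun k => k.1 == d) = [] := by
            simp [show (x.1 == d) = false from by simp [Ne.symm hdx]]
          rw [this, List.append_nil]
        rw [h2]
      · rw [List.filter_append, hfilt, List.nil_append]
        have h3 : [x].filter (fun k => k.1 == x.1) = [x] := by simp
        rw [h3, List.map_singleton]
        rfl

theorem guB_nest (ks : List (String × String)) :
    ((PySem.Dict.counter ks).items.foldl guStepPivot PySem.Dict.empty) = guNest ks := by
  rw [PySem.Dict.items_counter,
      pivot_map (fun k => (ks.count k : Int)) (PySem.Set.ofList ks) (PySem.Set.nodup_ofList ks)]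
  apply PySem.Dict.ext
  show ((PySem.Set.ofList ((PySem.Set.ofList ks).map Prod.fst)).map _ : List _) = _
  rw [ofList_map_ofList]
  refine List.map_congr_left (fun d hd => ?_)
  refine congrArg (Prod.mk d) (congrArg PySem.Dict.mk ?_)
  rw [ofList_filter]
  have hfst : ∀ q ∈ ks.filter (fun k => k.1 == d), q.1 = d := by
    intro q hq
    simpa using (List.mem_filter.1 hq).2
  have hfst' : ∀ q ∈ PySem.Set.ofList (ks.filter (fun k => k.1 == d)), q.1 = d :=
    fun q hq => hfst q ((PySem.Set.mem_ofList _ _).1 hq)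
  rw [ofList_map_snd_const_fst d _ hfst, List.map_map]
  refine List.map_congr_left (fun k hk => ?_)
  have hk1 : k.1 = d := hfst' k hk
  have hkk : (d, k.2) = k := Prod.ext hk1.symm rfl
  simp only [Function.comp]
  rw [hkk]

-- ===== VERDICT (by name: the statement is the Claim_ definition above) =====
theorem generate_user_daily_spec : Claim_equal_generate_user_daily := by
  intro base_data _ _
  unfold Spec_generate_user_daily generate_user_daily generate_user_daily_alt
  simp only []
  rw [← List.foldl_map (f := guKey) (g := guStepA), ← List.foldl_map (f := guKey) (g := guStepCount)]
  rw [guA_nest]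
  have : (((PySem.Dict.ofList base_data).getD "elements" []).map guKey).foldl guStepCount PySem.Dict.empty
      = PySem.Dict.counter (((PySem.Dict.ofList base_data).getD "elements" []).map guKey) :=
    PySem.Dict.foldl_insert_getD_add_one_eq_counter _
  rw [this, guB_nest]
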